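-- pv_equiv track=rewrite | github.com/aorursy/KT_dataset_py | toothpaste_google-play-store-preprocessing.py | only_num
-- ===== SOURCE A (Python) =====
-- def only_num(x):
--
--     num = ''
--
--     dot = w = -1
--
--
--
--     for i in range(0, len(x)):
--
--         if x[i] == '.':
--
--             zero_left = True
--
--
--
--             for ii in range(++i, len(x)):
--
--                 if x[ii].isnumeric() and x[ii] != '0':
--
--                     zero_left = False
--
--                     w = ii - i
--
--
--
--             if zero_left:
--
--                 break
--
--             else:
--
--                 num = num + x[i]
--
--                 dot = i
--
--
--
--         elif x[i].isnumeric():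
--
--             num = num + x[i]
--
--
--
--     if num == '':
--
--         num = '0'
--
--
--
--     return num, dot, w
-- ===== SOURCE B (Python) =====
-- def only_num(x):
--     # Precompute the last nonzero-digit index once; each dot is then decided directly.
--     last_nz = -1
--     for i, c in enumerate(x):
--         if c.isnumeric() and c != '0':
--             last_nz = i
--     num = []
--     dot = w = -1
--     for i, c in enumerate(x):
--         if c == '.':
--             if last_nz < i:
--                 break
--             num.append('.')
--             dot = i
--             w = last_nz - i
--         elif c.isnumeric():
--             num.append(c)
--     return (''.join(num) or '0'), dot, w
-- ===== Notes on version B (the rewrite author's own statement) =====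
-- stated objective: alternative
-- what changed: B precomputes the last nonzero-digit index in one pass and decides each dot directly from it, replacing A's inner scan of the suffix at every dot.
import Mathlib
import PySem

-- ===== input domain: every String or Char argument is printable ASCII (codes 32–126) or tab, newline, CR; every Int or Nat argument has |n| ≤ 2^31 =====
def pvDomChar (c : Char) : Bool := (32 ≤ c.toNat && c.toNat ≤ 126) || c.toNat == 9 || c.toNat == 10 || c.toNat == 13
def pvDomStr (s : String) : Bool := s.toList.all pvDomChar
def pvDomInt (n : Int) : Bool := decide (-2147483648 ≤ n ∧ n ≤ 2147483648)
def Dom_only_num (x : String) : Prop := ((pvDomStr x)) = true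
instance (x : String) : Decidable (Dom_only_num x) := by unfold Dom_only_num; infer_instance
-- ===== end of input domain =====

-- B replaces A's per-dot inner suffix scan by a single precomputed last-nonzero-digit index; objective: alternative.

-- ===== PORT A =====
-- inner loop: for ii in range(i, len(x)): if x[ii].isnumeric() and x[ii] != '0': zero_left=False; w=ii-i
def pvInnerA (cs : List Char) (i n : Nat) (w : Int) : Bool × Int :=
  (PySem.List.pyRange (i : Int) (n : Int) 1).foldl
    (fun s ii =>
      let c := PySem.List.pyGetD cs ii ' '
      if PySem.Chars.isdigit c && c != '0' then (false, ii - (i : Int)) else s)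
    (true, w)

def pvLoopA (cs : List Char) (n i : Nat) (num : List Char) (dot w : Int) :
    List Char × Int × Int :=
  if h : i < n then
    let c := PySem.List.pyGetD cs (i : Int) ' '
    if c = '.' then
      let r := pvInnerA cs i n w
      if r.1 then (num, dot, r.2)
      else pvLoopA cs n (i + 1) (num ++ ['.']) (i : Int) r.2
    else if PySem.Chars.isdigit c then pvLoopA cs n (i + 1) (num ++ [c]) dot w
    else pvLoopA cs n (i + 1) num dot w
  else (num, dot, w)
  termination_by n - i

def only_num (x : String) : String × Int × Int :=
  let cs := x.toList
  let r := pvLoopA cs cs.length 0 [] (-1) (-1)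
  (if r.1 = [] then "0" else String.ofList r.1, r.2.1, r.2.2)

-- ===== PORT B =====
-- last_nz = last index of a nonzero digit (−1 if none), one pass
def pvLastNZ (cs : List Char) : Int :=
  (PySem.List.enumerate cs 0).foldl
    (fun m p => if PySem.Chars.isdigit p.2 && p.2 != '0' then p.1 else m) (-1)

def pvLoopB (M i : Int) (rest num : List Char) (dot w : Int) : List Char × Int × Int :=
  match rest with
  | [] => (num, dot, w)
  | c :: t =>
    if c = '.' then
      if M < i then (num, dot, w)
      else pvLoopB M (i + 1) t (num ++ ['.']) i (M - i)
    else if PySem.Chars.isdigit c then pvLoopB M (i + 1) t (num ++ [c]) dot w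
    else pvLoopB M (i + 1) t num dot w

def only_num_alt (x : String) : String × Int × Int :=
  let cs := x.toList
  let r := pvLoopB (pvLastNZ cs) 0 cs [] (-1) (-1)
  (if r.1 = [] then "0" else String.ofList r.1, r.2.1, r.2.2)

-- ===== PRECONDITION & SPEC =====
def Spec_only_num (x : String) (out : String × Int × Int) : Prop := out = only_num_alt x
instance (x : String) (out : String × Int × Int) : Decidable (Spec_only_num x out) := by unfold Spec_only_num; infer_instance

-- ===== CLAIM (what is proved, stated in full; the proofs are below) =====
def Claim_equal_only_num : Prop := ∀ (x : String), Dom_only_num x → Spec_only_num x (only_num x)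

-- ===== LEMMAS AND PROOFS =====

-- last nonzero-digit index among positions < n (−1 if none); proof-side characterisation
def lnzB (cs : List Char) : Nat → Int
  | 0 => -1
  | n + 1 => if PySem.Chars.isdigit (cs.getD n ' ') && cs.getD n ' ' != '0' then (n : Int) else lnzB cs n

theorem lnzB_lt (cs : List Char) (n : Nat) : lnzB cs n < (n : Int) := by
  induction n with
  | zero => simp [lnzB]
  | succ k ih =>
    simp only [lnzB]
    split
    · push_cast; omega
    · push_cast; omega

theorem innerA_eq (cs : List Char) (n i : Nat) (w : Int) (hi : i ≤ n) :
    pvInnerA cs i n w =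
      if lnzB cs n < (i : Int) then (true, w) else (false, lnzB cs n - (i : Int)) := by
  induction n with
  | zero =>
    have : i = 0 := Nat.le_zero.mp hi
    subst this
    simp [pvInnerA, PySem.List.pyRange_one_eq_nil, lnzB]
  | succ k ih =>
    rcases Nat.lt_or_ge k i with hk | hk
    · -- i = k+1 : empty range
      have hik : i = k + 1 := by omega
      subst hik
      have hlt := lnzB_lt cs (k + 1)
      simp only [pvInnerA]
      rw [PySem.List.pyRange_one_eq_nil (le_refl _), List.foldl_nil, if_pos hlt]
    · -- i ≤ k : split off the last index k
      have hsplit : PySem.List.pyRange (i : Int) ((k : Int) + 1) 1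
          = PySem.List.pyRange (i : Int) (k : Int) 1 ++ [(k : Int)] :=
        PySem.List.pyRange_one_succ_right (by exact_mod_cast hk)
      have hA : pvInnerA cs i (k + 1) w
          = (let c := PySem.List.pyGetD cs (k : Int) ' '
             if PySem.Chars.isdigit c && c != '0' then (false, (k : Int) - (i : Int))
             else pvInnerA cs i k w) := by
        simp only [pvInnerA]
        push_cast
        rw [hsplit, List.foldl_append]
        simp
      rw [hA]
      have hget : PySem.List.pyGetD cs (k : Int) ' ' = cs.getD k ' ' :=
        PySem.List.pyGetD_natCast cs k ' '
      have hki : ¬ ((k : Int) < (i : Int)) := by exact_mod_cast Nat.not_lt.mpr hk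
      simp only [hget, lnzB]
      by_cases hc : (PySem.Chars.isdigit (cs.getD k ' ') && cs.getD k ' ' != '0') = true
      · rw [if_pos hc, if_pos hc, if_neg hki]
      · rw [if_neg hc, if_neg hc, ih hk]

theorem lnzB_append_le (cs : List Char) (c : Char) (k : Nat) (hk : k ≤ cs.length) :
    lnzB (cs ++ [c]) k = lnzB cs k := by
  induction k with
  | zero => rfl
  | succ j ih =>
    have hj : j < cs.length := by omega
    have hget : (cs ++ [c]).getD j ' ' = cs.getD j ' ' := by
      simp [List.getD, List.getElem?_append_left hj]
    simp only [lnzB, hget, ih (by omega)]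

theorem lastNZ_eq (cs : List Char) : pvLastNZ cs = lnzB cs cs.length := by
  induction cs using List.reverseRecOn with
  | nil => rfl
  | append_singleton t c ih =>
    have henum : PySem.List.enumerate (t ++ [c]) (0 : Int)
        = PySem.List.enumerate t 0 ++ [((t.length : Int), c)] := by
      rw [PySem.List.enumerate_append]
      simp [PySem.List.enumerate_cons]
    have hget : (t ++ [c]).getD t.length ' ' = c := by
      simp [List.getD]
    simp only [pvLastNZ, henum, List.foldl_append, List.foldl_cons, List.foldl_nil]
    by_cases hc : PySem.Chars.isdigit c && c != '0'
    · simp [hc, lnzB, List.length_append]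
    · simp only [hc]
      have := lnzB_append_le t c t.length (le_refl _)
      simp [lnzB, List.length_append, hc, this, ← ih, pvLastNZ]

theorem loop_eq (cs : List Char) (d i : Nat) (num : List Char) (dot w : Int)
    (hd : cs.length - i ≤ d) :
    pvLoopA cs cs.length i num dot w
      = pvLoopB (lnzB cs cs.length) (i : Int) (cs.drop i) num dot w := by
  induction d generalizing i num dot w with
  | zero =>
    have hi : cs.length ≤ i := by omega
    rw [pvLoopA]
    simp [Nat.not_lt.mpr hi, List.drop_eq_nil_of_le hi, pvLoopB]
  | succ d ih =>
    by_cases h : i < cs.length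
    · have hdrop : cs.drop i = cs[i] :: cs.drop (i + 1) := List.drop_eq_getElem_cons h
      have hget : PySem.List.pyGetD cs (i : Int) ' ' = cs[i] := by
        rw [PySem.List.pyGetD_natCast]
        simp [List.getD, List.getElem?_eq_getElem h]
      have ih' : ∀ (num : List Char) (dot w : Int),
          pvLoopA cs cs.length (i + 1) num dot w
            = pvLoopB (lnzB cs cs.length) ((i : Int) + 1) (cs.drop (i + 1)) num dot w := by
        intro num dot w
        have hcast : ((i : Int) + 1) = ((i + 1 : Nat) : Int) := by push_cast; ring
        rw [hcast]
        exact ih (i + 1) num dot w (by omega)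
      rw [pvLoopA]
      simp only [h, dif_pos, hget, hdrop, pvLoopB,
        innerA_eq cs cs.length i w (Nat.le_of_lt h), ih']
      by_cases hc : cs[i] = '.'
      · by_cases hM : lnzB cs cs.length < (i : Int)
        · simp [hc, hM]
        · simp [hc, hM]
      · simp [hc]
    · rw [pvLoopA]
      simp [h, List.drop_eq_nil_of_le (Nat.le_of_not_lt h), pvLoopB]

-- ===== VERDICT (by name: the statement is the Claim_ definition above) =====
theorem only_num_spec : Claim_equal_only_num := by
  intro x _
  unfold Spec_only_num only_num only_num_alt
  have h := loop_eq x.toList x.toList.length 0 [] (-1) (-1) (by omega)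
  simp only [Nat.cast_zero, List.drop_zero] at h
  simp only [lastNZ_eq, h]
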